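-- pv_equiv track=rewrite | github.com/Reese-max/92-duty-scheduler | compare_formats.py | find_best_ods_sheet
-- ===== SOURCE A (Python) =====
-- def find_best_ods_sheet(ods_sheets, keyword, excel_sheet_name):
--     """Find the best matching ODS sheet for a given duty type keyword."""
--     candidates = []
--     for name in ods_sheets:
--         # Skip external references
--         if name.startswith("'file:"):
--             continue
--         if keyword in name:
--             # Prefer 114-2, then 114-1, then others
--             priority = 0
--             if '114-2' in name:
--                 priority = 3
--             elif '114-1' in name:
--                 priority = 2
--             elif '113-2' in name:
--                 priority = 1
--             candidates.append((priority, name))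
--
--     if not candidates:
--         return None
--
--     # Sort by priority descending, then by name length (shorter = more specific)
--     candidates.sort(key=lambda x: (-x[0], len(x[1])))
--     return candidates[0][1]
-- ===== SOURCE B (Python) =====
-- def find_best_ods_sheet(ods_sheets, keyword, excel_sheet_name):
--     """Find the best matching ODS sheet for a given duty type keyword.
--
--     Single linear pass: keep the best (priority, name) seen so far instead of
--     collecting all candidates and sorting them.  Strict comparison keeps the
--     first-encountered name on ties, matching the stable sort + [0] behaviour.
--     """
--     best = None  # (priority, name) of the best candidate so far
--     for name in ods_sheets:
--         # Skip external references and non-matching names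
--         if name.startswith("'file:") or keyword not in name:
--             continue
--         # Prefer 114-2, then 114-1, then 113-2, then others
--         if '114-2' in name:
--             priority = 3
--         elif '114-1' in name:
--             priority = 2
--         elif '113-2' in name:
--             priority = 1
--         else:
--             priority = 0
--         if best is None or priority > best[0] or (priority == best[0] and len(name) < len(best[1])):
--             best = (priority, name)
--     return best[1] if best is not None else None
-- ===== Notes on version B (the rewrite author's own statement) =====
-- stated objective: alternative
-- what changed: Replaces collect-all-candidates-then-sort-and-take-first with a single pass that keeps the best (priority, name) pair seen so far, using strict comparison to preserve the stable sort's leftmost-tie winner.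
import Mathlib
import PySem

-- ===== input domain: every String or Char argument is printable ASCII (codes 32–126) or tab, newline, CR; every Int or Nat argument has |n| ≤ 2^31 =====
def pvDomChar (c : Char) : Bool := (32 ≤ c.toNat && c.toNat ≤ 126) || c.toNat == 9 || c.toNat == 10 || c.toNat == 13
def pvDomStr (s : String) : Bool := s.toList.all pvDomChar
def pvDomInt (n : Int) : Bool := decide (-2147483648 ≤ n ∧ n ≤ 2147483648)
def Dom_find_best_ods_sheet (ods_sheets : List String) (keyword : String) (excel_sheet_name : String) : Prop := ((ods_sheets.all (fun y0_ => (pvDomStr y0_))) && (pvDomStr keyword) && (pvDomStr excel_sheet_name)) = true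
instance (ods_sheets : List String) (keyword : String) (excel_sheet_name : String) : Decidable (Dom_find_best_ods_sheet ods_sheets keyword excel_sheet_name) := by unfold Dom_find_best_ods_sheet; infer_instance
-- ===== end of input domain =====

-- B replaces A's collect-candidates-then-sort-and-take-first with a single pass
-- keeping the best (priority, name) pair so far (no candidate list, no sort).


-- ===== PORT A =====
def find_best_ods_sheet (ods_sheets : List String) (keyword : String) (excel_sheet_name : String) : Option String :=
  let candidates : List (Int × String) := ods_sheets.foldl (fun acc name =>
    if PySem.Str.startswith name "'file:" then acc   -- skip external references
    else if PySem.Str.isIn keyword name then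
      let priority : Int :=
        if PySem.Str.isIn "114-2" name then 3
        else if PySem.Str.isIn "114-1" name then 2
        else if PySem.Str.isIn "113-2" name then 1
        else 0
      acc ++ [(priority, name)]
    else acc) []
  if candidates = [] then none
  else
    -- candidates.sort(key=lambda x: (-x[0], len(x[1]))); return candidates[0][1]
    (PySem.List.sorted2 candidates (fun x => -x.1) (fun x => PySem.Str.len x.2)).head?.map Prod.snd

-- ===== PORT B =====
def find_best_ods_sheet_alt (ods_sheets : List String) (keyword : String) (excel_sheet_name : String) : Option String :=
  let best : Option (Int × String) := ods_sheets.foldl (fun best name =>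
    if PySem.Str.startswith name "'file:" || !PySem.Str.isIn keyword name then best
    else
      let priority : Int :=
        if PySem.Str.isIn "114-2" name then 3
        else if PySem.Str.isIn "114-1" name then 2
        else if PySem.Str.isIn "113-2" name then 1
        else 0
      match best with
      | none => some (priority, name)
      | some b =>
          if decide (priority > b.1) || (decide (priority = b.1) && decide (PySem.Str.len name < PySem.Str.len b.2))
          then some (priority, name) else some b) none
  best.map Prod.snd

-- ===== PRECONDITION & SPEC =====
def Spec_find_best_ods_sheet (ods_sheets : List String) (keyword : String) (excel_sheet_name : String) (out : Option String) : Prop := out = find_best_ods_sheet_alt ods_sheets keyword excel_sheet_name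
instance (ods_sheets : List String) (keyword : String) (excel_sheet_name : String) (out : Option String) : Decidable (Spec_find_best_ods_sheet ods_sheets keyword excel_sheet_name out) := by unfold Spec_find_best_ods_sheet; infer_instance

-- ===== CLAIM (what is proved, stated in full; the proofs are below) =====
def Claim_equal_find_best_ods_sheet : Prop := ∀ (ods_sheets : List String) (keyword : String) (excel_sheet_name : String), Dom_find_best_ods_sheet ods_sheets keyword excel_sheet_name → Spec_find_best_ods_sheet ods_sheets keyword excel_sheet_name (find_best_ods_sheet ods_sheets keyword excel_sheet_name)

-- ===== LEMMAS AND PROOFS =====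

-- the running "best so far" step for a comparison lt: leftmost minimum
def pvMinStep {α : Type} (lt : α → α → Bool) (o : Option α) (x : α) : Option α :=
  match o with
  | none => some x
  | some m => if lt x m then some x else some m

theorem pv_head_insertBy {α : Type} (lt : α → α → Bool) (x : α) (acc : List α) :
    (PySem.List.insertBy lt x acc).head? = pvMinStep lt acc.head? x := by
  cases acc with
  | nil => simp [PySem.List.insertBy, pvMinStep]
  | cons y ys =>
      by_cases h : lt x y <;> simp [PySem.List.insertBy, pvMinStep, h]

theorem pv_head_foldl_insertBy {α : Type} (lt : α → α → Bool) :
    ∀ (xs : List α) (acc : List α),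
      (xs.foldl (fun a x => PySem.List.insertBy lt x a) acc).head? = xs.foldl (pvMinStep lt) acc.head? := by
  intro xs
  induction xs with
  | nil => intro acc; rfl
  | cons x xs ih =>
      intro acc
      simp only [List.foldl_cons]
      rw [ih, pv_head_insertBy]

-- the head of the stable insertion sort is the leftmost minimum under the lex key
theorem pv_head_sorted2 {α : Type} (xs : List α) (k1 k2 : α → Int) (lt : α → α → Bool)
    (hlt : lt = fun a b => decide (k1 a < k1 b) || (!decide (k1 b < k1 a) && decide (k2 a < k2 b))) :
    (PySem.List.sorted2 xs k1 k2).head? = xs.foldl (pvMinStep lt) none := by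
  subst hlt
  exact pv_head_foldl_insertBy _ xs []

-- B's comparison boolean equals the lexicographic (-priority, len) comparison
theorem pv_cmp_eq (p q : Int) (L : Bool) :
    (decide (p > q) || (decide (p = q) && L)) = (decide (-p < -q) || (!decide (-q < -p) && L)) := by
  by_cases h1 : q < p
  · simp [h1, show -p < -q by omega]
  · by_cases h2 : p = q
    · subst h2; simp
    · simp [h1, h2, show ¬(-p < -q) by omega, show -q < -p by omega]

-- folding the min step over A's built candidate list = B's fused one-pass fold
theorem pv_fuse (keyword : String) (lt : Int × String → Int × String → Bool) :
    ∀ (ods : List String) (cacc : List (Int × String)) (o : Option (Int × String)),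
      (ods.foldl (fun acc name =>
          if PySem.Str.startswith name "'file:" then acc
          else if PySem.Str.isIn keyword name then
            acc ++ [((if PySem.Str.isIn "114-2" name then 3
                      else if PySem.Str.isIn "114-1" name then 2
                      else if PySem.Str.isIn "113-2" name then 1
                      else 0 : Int), name)]
          else acc) cacc).foldl (pvMinStep lt) o
      = ods.foldl (fun b name =>
          if PySem.Str.startswith name "'file:" || !PySem.Str.isIn keyword name then b
          else pvMinStep lt b ((if PySem.Str.isIn "114-2" name then 3
                      else if PySem.Str.isIn "114-1" name then 2
                      else if PySem.Str.isIn "113-2" name then 1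
                      else 0 : Int), name)) (cacc.foldl (pvMinStep lt) o) := by
  intro ods
  induction ods with
  | nil => intro cacc o; rfl
  | cons name rest ih =>
      intro cacc o
      simp only [List.foldl_cons]
      rw [ih]
      cases h1 : PySem.Str.startswith name "'file:" <;>
        cases h2 : PySem.Str.isIn keyword name <;>
          simp [List.foldl_append]

-- ===== VERDICT (by name: the statement is the Claim_ definition above) =====
theorem find_best_ods_sheet_spec : Claim_equal_find_best_ods_sheet := by
  intro ods keyword excel _hdom
  unfold Spec_find_best_ods_sheet find_best_ods_sheet find_best_ods_sheet_alt
  have key := pv_fuse keyword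
    (fun a b => decide (-a.1 < -b.1) ||
      (!decide (-b.1 < -a.1) && decide (PySem.Str.len a.2 < PySem.Str.len b.2))) ods [] none
  have hB : (fun (b : Option (Int × String)) (name : String) =>
      if PySem.Str.startswith name "'file:" || !PySem.Str.isIn keyword name then b
      else
        let priority : Int :=
          if PySem.Str.isIn "114-2" name then 3
          else if PySem.Str.isIn "114-1" name then 2
          else if PySem.Str.isIn "113-2" name then 1
          else 0
        match b with
        | none => some (priority, name)
        | some bb =>
            if decide (priority > bb.1) || (decide (priority = bb.1) && decide (PySem.Str.len name < PySem.Str.len bb.2))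
            then some (priority, name) else some bb)
      = (fun b name =>
          if PySem.Str.startswith name "'file:" || !PySem.Str.isIn keyword name then b
          else pvMinStep (fun a b => decide (-a.1 < -b.1) ||
                (!decide (-b.1 < -a.1) && decide (PySem.Str.len a.2 < PySem.Str.len b.2)))
            b ((if PySem.Str.isIn "114-2" name then 3
                      else if PySem.Str.isIn "114-1" name then 2
                      else if PySem.Str.isIn "113-2" name then 1
                      else 0 : Int), name)) := by
    funext b name
    cases b with
    | none => rfl
    | some bb =>
        simp only [pvMinStep]
        rw [pv_cmp_eq]
  simp only []
  rw [hB]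
  split_ifs with hc
  · rw [hc] at key
    exact congrArg (Option.map Prod.snd) key
  · rw [pv_head_sorted2 _ (fun x : Int × String => -x.1) (fun x : Int × String => PySem.Str.len x.2)
        (fun a b => decide (-a.1 < -b.1) ||
          (!decide (-b.1 < -a.1) && decide (PySem.Str.len a.2 < PySem.Str.len b.2))) rfl]
    exact congrArg (Option.map Prod.snd) key
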